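-- pv_equiv track=rewrite | github.com/juandarr/ProjectEuler | 128.py | get_rings
-- ===== SOURCE A (Python) =====
-- def get_rings(limit_r):
--     '''
--     calculates all the rings from 0 to limit_r
--     '''
--     rings = {0:[1]}
--     n = 1
--     limit_p=1
--     for r in range(1,limit_r+1):
--         n += 6*r
--         rings[r]=[i for i in range(n-6*r+1,n+1)]
--         limit_p += 6*r
--     return rings,limit_p
-- ===== SOURCE B (Python) =====
-- def get_rings(limit_r):
--     '''
--     calculates all the rings from 0 to limit_r
--     '''
--     # Ring r (r>=1) starts at 3*r*(r-1)+2 and has 6*r elements, so it is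
--     # range(3*r*(r-1)+2, 3*r*(r+1)+2); no running accumulator is needed.
--     rings = {0: [1]}
--     rings.update({r: list(range(3 * r * (r - 1) + 2, 3 * r * (r + 1) + 2))
--                   for r in range(1, limit_r + 1)})
--     m = max(limit_r, 0)
--     return rings, 1 + 3 * m * (m + 1)
-- ===== Notes on version B (the rewrite author's own statement) =====
-- stated objective: simpler
-- what changed: Each ring and the final limit_p are computed directly from closed-form formulas in a dict comprehension, instead of threading a running hexagonal-number accumulator and a running limit_p through the loop.
import Mathlib
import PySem

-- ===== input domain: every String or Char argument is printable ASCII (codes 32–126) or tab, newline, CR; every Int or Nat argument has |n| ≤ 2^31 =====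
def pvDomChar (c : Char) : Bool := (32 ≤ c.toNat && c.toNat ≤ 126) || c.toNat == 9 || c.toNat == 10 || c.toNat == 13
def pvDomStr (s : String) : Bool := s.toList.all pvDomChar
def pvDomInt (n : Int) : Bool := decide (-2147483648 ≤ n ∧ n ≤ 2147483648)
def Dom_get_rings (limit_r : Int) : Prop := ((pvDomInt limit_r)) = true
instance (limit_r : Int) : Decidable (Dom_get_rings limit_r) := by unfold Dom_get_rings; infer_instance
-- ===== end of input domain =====

-- B computes each ring and limit_p by closed forms instead of A's running accumulators (objective: simpler).

-- ===== PORT A =====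
-- the body of A's for-loop (dict insert + running n and limit_p), as a named helper
def pvStepA (st : PySem.Dict Int (List Int) × Int × Int) (r : Int) :
    PySem.Dict Int (List Int) × Int × Int :=
  let n := st.2.1 + 6 * r
  (st.1.insert r (PySem.List.pyRange (n - 6 * r + 1) (n + 1) 1), n, st.2.2 + 6 * r)

def get_rings (limit_r : Int) : (List (Int × List Int)) × Int :=
  let s := (PySem.List.pyRange 1 (limit_r + 1) 1).foldl pvStepA (PySem.Dict.ofList [(0, [1])], 1, 1)
  (s.1.items, s.2.2)

-- ===== PORT B =====
-- the closed-form ring of B's dict comprehension, as a named helper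
def pvRing (r : Int) : Int × List Int :=
  (r, PySem.List.pyRange (3 * r * (r - 1) + 2) (3 * r * (r + 1) + 2) 1)

def get_rings_alt (limit_r : Int) : (List (Int × List Int)) × Int :=
  let rings : List (Int × List Int) := (0, [1]) :: (PySem.List.pyRange 1 (limit_r + 1) 1).map pvRing
  let m := max limit_r 0
  (rings, 1 + 3 * m * (m + 1))

-- ===== PRECONDITION & SPEC =====
def Spec_get_rings (limit_r : Int) (out : (List (Int × List Int)) × Int) : Prop := out = get_rings_alt limit_r
instance (limit_r : Int) (out : (List (Int × List Int)) × Int) : Decidable (Spec_get_rings limit_r out) := by unfold Spec_get_rings; infer_instance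

-- ===== CLAIM (what is proved, stated in full; the proofs are below) =====
def Claim_equal_get_rings : Prop := ∀ (limit_r : Int), Dom_get_rings limit_r → Spec_get_rings limit_r (get_rings limit_r)

-- ===== LEMMAS AND PROOFS =====

lemma pvLoopA (k : Nat) :
    (PySem.List.pyRange 1 ((k : Int) + 1) 1).foldl pvStepA (PySem.Dict.ofList [(0, [1])], 1, 1)
      = (PySem.Dict.mk ((0, [1]) :: (PySem.List.pyRange 1 ((k : Int) + 1) 1).map pvRing),
         1 + 3 * (k : Int) * ((k : Int) + 1), 1 + 3 * (k : Int) * ((k : Int) + 1)) := by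
  induction k with
  | zero =>
      rw [PySem.List.pyRange_one_eq_nil (by norm_num)]
      simp
      decide
  | succ k ih =>
      have hsplit : PySem.List.pyRange 1 (((k + 1 : Nat) : Int) + 1) 1
          = PySem.List.pyRange 1 ((k : Int) + 1) 1 ++ [(k : Int) + 1] := by
        have hb : ((k + 1 : Nat) : Int) + 1 = ((k : Int) + 1) + 1 := by push_cast; ring
        rw [hb, PySem.List.pyRange_one_succ_right (by omega)]
      have hnc : (PySem.Dict.mk ((0, [1]) ::
            (PySem.List.pyRange 1 ((k : Int) + 1) 1).map pvRing)).contains ((k : Int) + 1) = false := by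
        rw [PySem.Dict.contains_eq_decide_mem_keys]
        simp only [PySem.Dict.keys_mk, List.map_cons, List.map_map, decide_eq_false_iff_not,
          List.mem_cons, List.mem_map]
        rintro (h | ⟨r, hr, hr'⟩)
        · omega
        · have := (PySem.List.mem_pyRange_one.mp hr).2
          simp [pvRing] at hr'
          omega
      rw [hsplit, List.foldl_append, ih]
      simp only [List.foldl_cons, List.foldl_nil, pvStepA]
      refine Prod.ext ?_ (Prod.ext ?_ ?_)
      · apply PySem.Dict.ext
        rw [PySem.Dict.items_insert, hnc, if_neg (by simp)]
        simp only [List.map_append, List.map_cons, List.map_nil,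
          List.cons_append]
        congr 2
        simp only [pvRing]
        congr 2; ring_nf
      · simp; ring
      · simp; ring

theorem get_rings_spec : Claim_equal_get_rings := by
  intro limit_r _
  simp only [Spec_get_rings, get_rings, get_rings_alt]
  by_cases h : 0 ≤ limit_r
  · obtain ⟨k, rfl⟩ := Int.eq_ofNat_of_zero_le h
    rw [pvLoopA k]
    simp
  · have hnil : PySem.List.pyRange 1 (limit_r + 1) 1 = [] :=
      PySem.List.pyRange_one_eq_nil (by omega)
    rw [hnil]
    simp [max_eq_right (le_of_not_ge h : limit_r ≤ 0)]
    decide
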